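-- pv_equiv track=rewrite | github.com/wearedumps/Badius | scripts/prueba.py | normalizar_identidad
-- ===== SOURCE A (Python) =====
-- def normalizar_identidad(texto: str) -> str:
--     t = texto
--     for viejo, nuevo in {
--         "Nidum AI": "bot de Twitch basado en Llama 3.2",
--         "Nidum": "bot basado en Llama 3.2",
--         "asistente de Python": "asistente de Twitch",
--     }.items():
--         t = t.replace(viejo, nuevo)
--     return t
-- ===== SOURCE B (Python) =====
-- def normalizar_identidad(texto: str) -> str:
--     # One left-to-right scan; patterns tried in priority order ("Nidum AI" before "Nidum").
--     reglas = [
--         ("Nidum AI", "bot de Twitch basado en Llama 3.2"),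
--         ("Nidum", "bot basado en Llama 3.2"),
--         ("asistente de Python", "asistente de Twitch"),
--     ]
--     partes = []
--     i = 0
--     n = len(texto)
--     while i < n:
--         for viejo, nuevo in reglas:
--             if texto.startswith(viejo, i):
--                 partes.append(nuevo)
--                 i += len(viejo)
--                 break
--         else:
--             partes.append(texto[i])
--             i += 1
--     return "".join(partes)
-- ===== Notes on version B (the rewrite author's own statement) =====
-- stated objective: alternative
-- what changed: Replaced A's three sequential full-string str.replace passes by a single left-to-right scan that tries the three patterns in priority order at each position and emits replacements on the fly.
import Mathlib
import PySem

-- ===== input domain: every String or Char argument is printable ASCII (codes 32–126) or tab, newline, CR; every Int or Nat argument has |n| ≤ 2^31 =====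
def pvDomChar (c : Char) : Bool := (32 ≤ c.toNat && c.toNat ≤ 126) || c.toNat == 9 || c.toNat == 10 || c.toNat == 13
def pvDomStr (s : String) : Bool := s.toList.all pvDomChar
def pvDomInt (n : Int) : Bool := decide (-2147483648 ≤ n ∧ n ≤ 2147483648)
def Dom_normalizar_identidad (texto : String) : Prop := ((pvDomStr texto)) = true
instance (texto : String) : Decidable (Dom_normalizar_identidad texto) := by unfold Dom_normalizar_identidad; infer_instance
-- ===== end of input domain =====

-- B replaces A's three sequential str.replace passes by one left-to-right scan trying the
-- three patterns in priority order at each position (alternative decomposition, same cost).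


-- ===== PORT A =====
-- A: dict of (viejo, nuevo) pairs in insertion order, folded with str.replace.
def normalizar_identidad (texto : String) : String :=
  [("Nidum AI", "bot de Twitch basado en Llama 3.2"),
   ("Nidum", "bot basado en Llama 3.2"),
   ("asistente de Python", "asistente de Twitch")].foldl
    (fun t vn => PySem.Str.replace t vn.1 vn.2) texto

-- ===== PORT B =====
-- B's rule table as character lists (texto.startswith(viejo, i) is a prefix test on the rest).
def P1 : List Char := ['N', 'i', 'd', 'u', 'm', ' ', 'A', 'I']
def R1 : List Char := ['b', 'o', 't', ' ', 'd', 'e', ' ', 'T', 'w', 'i', 't', 'c', 'h', ' ', 'b', 'a', 's', 'a', 'd', 'o', ' ', 'e', 'n', ' ', 'L', 'l', 'a', 'm', 'a', ' ', '3', '.', '2']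
def P2 : List Char := ['N', 'i', 'd', 'u', 'm']
def R2 : List Char := ['b', 'o', 't', ' ', 'b', 'a', 's', 'a', 'd', 'o', ' ', 'e', 'n', ' ', 'L', 'l', 'a', 'm', 'a', ' ', '3', '.', '2']
def P3 : List Char := ['a', 's', 'i', 's', 't', 'e', 'n', 't', 'e', ' ', 'd', 'e', ' ', 'P', 'y', 't', 'h', 'o', 'n']
def R3 : List Char := ['a', 's', 'i', 's', 't', 'e', 'n', 't', 'e', ' ', 'd', 'e', ' ', 'T', 'w', 'i', 't', 'c', 'h']

-- the while-loop of Source B: at the current position try the rules in order; on a match emit the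
-- replacement and advance by the pattern's length, otherwise emit the character and advance by one.
def bScan : List Char → List Char
  | [] => []
  | c :: t =>
    if h1 : PySem.Chars.startswith (c :: t) P1 then R1 ++ bScan ((c :: t).drop P1.length)
    else if h2 : PySem.Chars.startswith (c :: t) P2 then R2 ++ bScan ((c :: t).drop P2.length)
    else if h3 : PySem.Chars.startswith (c :: t) P3 then R3 ++ bScan ((c :: t).drop P3.length)
    else c :: bScan t
termination_by l => l.length
decreasing_by
· have hl := ((PySem.Chars.startswith_iff _ _).mp h1).length_le
  have e : P1.length = 8 := rfl
  simp only [List.length_drop, List.length_cons, e] at hl ⊢; omega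
· have hl := ((PySem.Chars.startswith_iff _ _).mp h2).length_le
  have e : P2.length = 5 := rfl
  simp only [List.length_drop, List.length_cons, e] at hl ⊢; omega
· have hl := ((PySem.Chars.startswith_iff _ _).mp h3).length_le
  have e : P3.length = 19 := rfl
  simp only [List.length_drop, List.length_cons, e] at hl ⊢; omega
· simp

def normalizar_identidad_alt (texto : String) : String :=
  String.ofList (bScan texto.toList)

-- ===== PRECONDITION & SPEC =====
def Spec_normalizar_identidad (texto : String) (out : String) : Prop := out = normalizar_identidad_alt texto
instance (texto : String) (out : String) : Decidable (Spec_normalizar_identidad texto out) := by unfold Spec_normalizar_identidad; infer_instance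

-- ===== CLAIM (what is proved, stated in full; the proofs are below) =====
def Claim_equal_normalizar_identidad : Prop := ∀ (texto : String), Dom_normalizar_identidad texto → Spec_normalizar_identidad texto (normalizar_identidad texto)

-- ===== LEMMAS AND PROOFS =====

-- structural form of PySem.Chars.replace for a nonempty pattern
def rep (old new : List Char) : List Char → List Char
  | [] => []
  | c :: t =>
    if h : old.isPrefixOf (c :: t) ∧ old ≠ [] then new ++ rep old new ((c :: t).drop old.length)
    else c :: rep old new t
termination_by l => l.length
decreasing_by
· have h1 := (List.isPrefixOf_iff_prefix.mp h.1).length_le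
  have h2 := h.2
  simp only [List.length_cons, List.length_drop]
  cases old with
  | nil => exact absurd rfl h2
  | cons a b => simp only [List.length_cons] at h1 ⊢; omega
· simp

lemma rep_nil (old new : List Char) : rep old new [] = [] := by simp [rep]

lemma rep_pos (old new : List Char) (l : List Char) (hp : old <+: l) (hne : old ≠ []) :
    rep old new l = new ++ rep old new (l.drop old.length) := by
  cases l with
  | nil => cases old with
    | nil => exact absurd rfl hne
    | cons a b => exact absurd (List.prefix_nil.mp hp) (by simp)
  | cons c t => rw [rep]; simp [List.isPrefixOf_iff_prefix, hp, hne]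

lemma rep_neg (old new : List Char) (c : Char) (t : List Char) (h : ¬ old <+: (c :: t)) :
    rep old new (c :: t) = c :: rep old new t := by
  rw [rep]; simp [List.isPrefixOf_iff_prefix, h]

lemma go_spec (old new : List Char) (hne : old ≠ []) :
    ∀ (fuel : Nat) (l acc : List Char), l.length ≤ fuel →
      PySem.Chars.replace.go old new fuel l acc = acc.reverse ++ rep old new l := by
  intro fuel
  induction fuel with
  | zero =>
    intro l acc hl
    have : l = [] := by cases l with | nil => rfl | cons c t => simp at hl
    subst this
    rw [PySem.Chars.replace.go]; simp [rep_nil]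
  | succ n ih =>
    intro l acc hl
    cases l with
    | nil => rw [PySem.Chars.replace.go]; simp [rep_nil]; omega
    | cons c t =>
      rw [PySem.Chars.replace.go]
      by_cases hp : old.isPrefixOf (c :: t)
      · simp only [hp, if_pos]
        have hlen : (List.drop old.length (c :: t)).length ≤ n := by
          have := (List.isPrefixOf_iff_prefix.mp hp).length_le
          cases old with
          | nil => exact absurd rfl hne
          | cons a b =>
            simp only [List.length_drop, List.length_cons] at *
            omega
        rw [ih _ _ hlen, rep_pos old new _ (List.isPrefixOf_iff_prefix.mp hp) hne]
        simp
      · simp only [hp, if_neg, Bool.false_eq_true, not_false_iff]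
        have hlen : t.length ≤ n := by simp at hl; omega
        rw [ih _ _ hlen, rep_neg old new c t (fun hc => hp (List.isPrefixOf_iff_prefix.mpr hc))]
        simp

lemma replace_eq_rep (s old new : List Char) (hne : old ≠ []) :
    PySem.Chars.replace s old new = rep old new s := by
  rw [PySem.Chars.replace]
  have : old.isEmpty = false := by cases old with | nil => exact absurd rfl hne | cons a b => rfl
  rw [this]
  simp only [Bool.false_eq_true, if_neg, not_false_iff]
  exact go_spec old new hne s.length s [] le_rfl

lemma npf {a b : List Char} (h : a.isPrefixOf b = false) : ¬ a <+: b := fun hp => by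
  rw [List.isPrefixOf_iff_prefix.mpr hp] at h; cases h

-- "no occurrence of old starts inside a (even straddling into what follows a)"
def safeIn (old a : List Char) : Bool :=
  (List.range a.length).all fun i => !(old.isPrefixOf (a.drop i)) && !((a.drop i).isPrefixOf old)

lemma rep_append (old new : List Char) (hne : old ≠ []) :
    ∀ (a b : List Char), safeIn old a = true → rep old new (a ++ b) = a ++ rep old new b := by
  intro a
  induction a with
  | nil => intro b _; simp
  | cons c a' ih =>
    intro b hs
    have hs0 : ¬ old <+: (c :: a') ∧ ¬ (c :: a') <+: old := by
      have hb := (List.all_eq_true.mp hs) 0 (by simp [List.mem_range])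
      simp only [List.drop_zero, Bool.and_eq_true, Bool.not_eq_true'] at hb
      exact ⟨npf hb.1, npf hb.2⟩
    have hnm : ¬ old <+: ((c :: a') ++ b) := by
      intro h
      rcases List.prefix_or_prefix_of_prefix h (List.prefix_append (c :: a') b) with h' | h'
      · exact hs0.1 h'
      · exact hs0.2 h'
    have hs' : safeIn old a' = true := by
      apply List.all_eq_true.mpr
      intro i hi
      have := (List.all_eq_true.mp hs) (i + 1) (by simp [List.mem_range] at hi ⊢; omega)
      simpa using this
    rw [List.cons_append, rep_neg old new c (a' ++ b) hnm, ih b hs']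
    rfl

-- "no nonempty suffix of q is compatible with the start of new"
def okTail (q new : List Char) : Bool :=
  (List.range (q.length + 1)).all fun i =>
    (q.drop i).isEmpty || (!(q.drop i).isPrefixOf new && !new.isPrefixOf (q.drop i))

lemma okTail_spec (q new : List Char) (h : okTail q new = true) :
    ∀ q', q' <:+ q → q' ≠ [] → ¬ q' <+: new ∧ ¬ new <+: q' := by
  intro q' hsuf hq'
  obtain ⟨pre, hpre⟩ := hsuf
  have hi : q.drop pre.length = q' := by rw [← hpre, List.drop_left]
  have hle : pre.length ≤ q.length := by
    rw [← hpre]; simp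
  have hb := (List.all_eq_true.mp h) pre.length (by simp [List.mem_range]; omega)
  rw [hi] at hb
  have hie : q'.isEmpty = false := by
    cases q' with | nil => exact absurd rfl hq' | cons a b => rfl
  simp only [hie, Bool.false_or, Bool.and_eq_true, Bool.not_eq_true'] at hb
  exact ⟨npf hb.1, npf hb.2⟩

lemma pref_pres (old new : List Char) :
    ∀ (s q : List Char),
      (∀ q', q' <:+ q → q' ≠ [] → ¬ q' <+: new ∧ ¬ new <+: q') →
      q <+: rep old new s → q <+: s := by
  intro s
  induction s with
  | nil => intro q _ h; rw [rep_nil] at h; exact h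
  | cons c t ih =>
    intro q hH h
    by_cases hm : old.isPrefixOf (c :: t) ∧ old ≠ []
    · rw [rep_pos old new _ (List.isPrefixOf_iff_prefix.mp hm.1) hm.2] at h
      cases q with
      | nil => exact List.nil_prefix
      | cons qc q' =>
        exfalso
        rcases List.prefix_or_prefix_of_prefix h (List.prefix_append new _) with h' | h'
        · exact (hH (qc :: q') List.suffix_rfl (by simp)).1 h'
        · exact (hH (qc :: q') List.suffix_rfl (by simp)).2 h'
    · rw [rep] at h
      rw [dif_neg hm] at h
      cases q with
      | nil => exact List.nil_prefix
      | cons qc q' =>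
        rw [List.cons_prefix_cons] at h ⊢
        refine ⟨h.1, ?_⟩
        exact ih q' (fun r hr hrne => hH r (hr.trans (List.suffix_cons qc q')) hrne) h.2

lemma not_prefix_head {a c : Char} (p t : List Char) (h : a ≠ c) : ¬ (a :: p) <+: (c :: t) := by
  intro hp
  rw [List.cons_prefix_cons] at hp
  exact h hp.1

-- B's scan, unfolded shapes
lemma bScan_nil : bScan [] = [] := by simp [bScan]

lemma bScan_m1 (l : List Char) (hne : l ≠ []) (h : P1 <+: l) :
    bScan l = R1 ++ bScan (l.drop P1.length) := by
  cases l with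
  | nil => exact absurd rfl hne
  | cons c t => rw [bScan]; simp [PySem.Chars.startswith_iff, h]

lemma bScan_m2 (l : List Char) (hne : l ≠ []) (h1 : ¬ P1 <+: l) (h : P2 <+: l) :
    bScan l = R2 ++ bScan (l.drop P2.length) := by
  cases l with
  | nil => exact absurd rfl hne
  | cons c t => rw [bScan]; simp [PySem.Chars.startswith_iff, h1, h]

lemma bScan_m3 (l : List Char) (hne : l ≠ []) (h1 : ¬ P1 <+: l) (h2 : ¬ P2 <+: l)
    (h : P3 <+: l) :
    bScan l = R3 ++ bScan (l.drop P3.length) := by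
  cases l with
  | nil => exact absurd rfl hne
  | cons c t => rw [bScan]; simp [PySem.Chars.startswith_iff, h1, h2, h]

lemma bScan_no (c : Char) (t : List Char) (h1 : ¬ P1 <+: (c :: t)) (h2 : ¬ P2 <+: (c :: t))
    (h3 : ¬ P3 <+: (c :: t)) :
    bScan (c :: t) = c :: bScan t := by
  rw [bScan]
  simp [PySem.Chars.startswith_iff, h1, h2, h3]

-- the heart: three sequential single-pattern passes equal B's one prioritized scan
lemma three_eq_scan : ∀ (n : Nat) (l : List Char), l.length ≤ n →
    rep P3 R3 (rep P2 R2 (rep P1 R1 l)) = bScan l := by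
  intro n
  induction n with
  | zero =>
    intro l hl
    have : l = [] := by cases l with | nil => rfl | cons c t => simp at hl
    subst this
    rw [rep_nil, rep_nil, rep_nil, bScan_nil]
  | succ n ih =>
    intro l hl
    cases l with
    | nil => rw [rep_nil, rep_nil, rep_nil, bScan_nil]
    | cons c t =>
      by_cases h1 : P1 <+: (c :: t)
      · obtain ⟨rest, hrest⟩ := h1
        rw [← hrest] at hl ⊢
        rw [rep_pos P1 R1 _ (List.prefix_append P1 rest) (by decide), List.drop_left,
            rep_append P2 R2 (by decide) R1 _ (by decide),
            rep_append P3 R3 (by decide) R1 _ (by decide),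
            bScan_m1 (P1 ++ rest) (by simp [P1]) (List.prefix_append P1 rest), List.drop_left]
        congr 1
        apply ih
        have e : P1.length = 8 := rfl
        simp [List.length_append, e] at hl ⊢
        omega
      · by_cases h2 : P2 <+: (c :: t)
        · obtain ⟨rest, hrest⟩ := h2
          -- c :: t = 'N'::'i'::'d'::'u'::'m'::rest ; pass 1 leaves these five chars alone
          have hshape : c :: t = 'N' :: 'i' :: 'd' :: 'u' :: 'm' :: rest := by
            rw [← hrest]; rfl
          rw [hshape] at hl h1 ⊢
          rw [rep_neg P1 R1 _ _ h1,
              rep_neg P1 R1 _ _ (not_prefix_head _ _ (by decide)),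
              rep_neg P1 R1 _ _ (not_prefix_head _ _ (by decide)),
              rep_neg P1 R1 _ _ (not_prefix_head _ _ (by decide)),
              rep_neg P1 R1 _ _ (not_prefix_head _ _ (by decide))]
          have e2 : 'N' :: 'i' :: 'd' :: 'u' :: 'm' :: rep P1 R1 rest
              = P2 ++ rep P1 R1 rest := rfl
          rw [e2, rep_pos P2 R2 _ (List.prefix_append P2 _) (by decide), List.drop_left,
              rep_append P3 R3 (by decide) R2 _ (by decide),
              bScan_m2 _ (by simp) h1 ⟨rest, rfl⟩]
          have ed : ('N' :: 'i' :: 'd' :: 'u' :: 'm' :: rest).drop P2.length = rest := rfl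
          rw [ed]
          congr 1
          apply ih
          simp at hl ⊢
          omega
        · by_cases h3 : P3 <+: (c :: t)
          · obtain ⟨rest, hrest⟩ := h3
            rw [← hrest] at hl h1 h2 ⊢
            rw [rep_append P1 R1 (by decide) P3 _ (by decide),
                rep_append P2 R2 (by decide) P3 _ (by decide),
                rep_pos P3 R3 _ (List.prefix_append P3 _) (by decide), List.drop_left,
                bScan_m3 (P3 ++ rest) (by simp [P3]) h1 h2 (List.prefix_append P3 rest),
                List.drop_left]
            congr 1
            apply ih
            have e : P3.length = 19 := rfl
            simp [List.length_append, e] at hl ⊢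
            omega
          · -- no rule matches at this position
            rw [rep_neg P1 R1 c t h1]
            have hx2 : ¬ P2 <+: (c :: rep P1 R1 t) := by
              intro h
              apply h2
              have : c :: rep P1 R1 t = rep P1 R1 (c :: t) := (rep_neg P1 R1 c t h1).symm
              rw [this] at h
              exact pref_pres P1 R1 (c :: t) P2 (okTail_spec P2 R1 (by decide)) h
            rw [rep_neg P2 R2 _ _ hx2]
            have hx3 : ¬ P3 <+: (c :: rep P2 R2 (rep P1 R1 t)) := by
              intro h
              apply h3
              have e : c :: rep P2 R2 (rep P1 R1 t) = rep P2 R2 (rep P1 R1 (c :: t)) := by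
                rw [rep_neg P1 R1 c t h1, rep_neg P2 R2 _ _ hx2]
              rw [e] at h
              have h' := pref_pres P2 R2 _ P3 (okTail_spec P3 R2 (by decide)) h
              exact pref_pres P1 R1 (c :: t) P3 (okTail_spec P3 R1 (by decide)) h'
            rw [rep_neg P3 R3 _ _ hx3, bScan_no c t h1 h2 h3]
            congr 1
            apply ih
            simp at hl
            omega

-- ===== VERDICT (by name: the statement is the Claim_ definition above) =====
theorem normalizar_identidad_spec : Claim_equal_normalizar_identidad := by
  intro texto _
  unfold Spec_normalizar_identidad normalizar_identidad normalizar_identidad_alt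
  simp only [List.foldl]
  have hrepl : ∀ (s : String) (o nw : String), PySem.Str.replace s o nw
      = String.ofList (PySem.Chars.replace s.toList o.toList nw.toList) := fun _ _ _ => rfl
  rw [hrepl, hrepl, hrepl]
  simp only [String.toList_ofList]
  have e1 : "Nidum AI".toList = P1 := by decide
  have e2 : "bot de Twitch basado en Llama 3.2".toList = R1 := by decide
  have e3 : "Nidum".toList = P2 := by decide
  have e4 : "bot basado en Llama 3.2".toList = R2 := by decide
  have e5 : "asistente de Python".toList = P3 := by decide
  have e6 : "asistente de Twitch".toList = R3 := by decide
  rw [e1, e2, e3, e4, e5, e6,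
      replace_eq_rep _ P1 R1 (by decide), replace_eq_rep _ P2 R2 (by decide),
      replace_eq_rep _ P3 R3 (by decide),
      three_eq_scan texto.toList.length texto.toList le_rfl]
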